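-- pv_equiv track=rewrite | github.com/raeez/chiral-bar-cobar | compute/lib/gaiotto_3d_ht_comparison_engine.py | sqed_boundary_character
-- ===== SOURCE A (Python) =====
-- from typing import Any, Dict, List, Optional, Tuple, Union
--
-- def sqed_boundary_character(q_max: int = 10) -> Dict[int, int]:
--     """Graded character of the SQED boundary VOA.
--
--     The SQED boundary VOA (CDG20 Section 6.4) is:
--       A^SQED = (betagamma x gl(1)_hat)^{U(1)}
--
--     The character is computed by the Molien integral:
--       chi(q) = integral_{|a|=1} da/(2pi i a) *
--                prod_{n>=1} 1/((1-q^n a)(1-q^n/a)(1-q^n))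
--
--     This equals the character of the XYZ model boundary VOA
--     (3d mirror symmetry: thm:sqed-xyz-mirror).
--
--     Returns {weight: dim} for weights 0 to q_max.
--     """
--     # Compute by expanding the product to given order
--     # Initialize: coefficient of q^0 a^0 = 1
--     # This is a standard plethystic computation
--
--     dims = {0: 1}  # vacuum
--
--     # Build up weight-by-weight
--     # At each weight n, count gauge-invariant states from beta, gamma, J
--     # beta has charge +1, gamma has charge -1, J has charge 0
--     # All have conformal weights starting at 1 (via modes)
--
--     # Direct computation: the gauge-invariant operators at each weight
--     # Weight 1: J (neutral), no gauge-invariant composites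
--     # Weight 2: J^2, :beta*gamma: (meson), partial J
--     # etc.
--
--     # For computational purposes, use the partition function formula
--     # chi_SQED(q) = sum_{n>=0} p(n) * q^n where p counts U(1)-invariant states
--
--     # Simplified: count based on free field decomposition
--     # At weight h: number of U(1)-invariant monomials in {beta_n, gamma_n, J_n}_{n>0}
--     # with total weight h
--
--     # Use generating function approach
--     from functools import lru_cache
--
--     @lru_cache(maxsize=256)
--     def count_states(weight: int, max_mode: int = 20) -> int:
--         """Count U(1)-invariant states at given conformal weight.
--
--         This counts partitions of weight into parts from:
--         - beta modes: weight n, charge +1 (n = 1, 2, ...)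
--         - gamma modes: weight n, charge -1 (n = 1, 2, ...)
--         - J modes: weight n, charge 0 (n = 1, 2, ...)
--         subject to total charge = 0.
--         """
--         if weight == 0:
--             return 1
--         if weight < 0:
--             return 0
--
--         # Dynamic programming: dp[w][c] = number of states at weight w, charge c
--         dp = {}
--         dp[(0, 0)] = 1
--
--         modes = []
--         for n in range(1, min(weight + 1, max_mode + 1)):
--             modes.append((n, 1))    # beta_n
--             modes.append((n, -1))   # gamma_n
--             modes.append((n, 0))    # J_n
--
--         for w_mode, c_mode in modes:
--             new_dp = dict(dp)
--             for (w, ch), count in dp.items():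
--                 # Add one copy of this mode
--                 nw = w + w_mode
--                 nc = ch + c_mode
--                 if nw <= weight:
--                     key = (nw, nc)
--                     new_dp[key] = new_dp.get(key, 0) + count
--             dp = new_dp
--
--         return dp.get((weight, 0), 0)
--
--     for h in range(1, q_max + 1):
--         dims[h] = count_states(h)
--
--     return dims
-- ===== SOURCE B (Python) =====
-- def sqed_boundary_character(q_max: int = 10):
--     """Graded character of the SQED boundary VOA: one bottom-up DP over
--     (weight, charge) shared by all weights, instead of a fresh DP per weight."""
--     dims = {0: 1}
--     if q_max < 1:
--         return dims
--     M = min(q_max, 20)          # mode cutoff (matches the max_mode=20 truncation)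
--     width = 2 * M + 1           # charges -M..M, stored with offset M
--     # dp[w][c] = number of states of weight w and charge c-M
--     dp = [[0] * width for _ in range(q_max + 1)]
--     dp[0][M] = 1
--     for n in range(1, M + 1):
--         for dc in (1, -1, 0):   # beta_n, gamma_n, J_n: each mode used at most once
--             dp = [[dp[w][c] + (dp[w - n][c - dc] if w >= n and 0 <= c - dc < width else 0)
--                    for c in range(width)]
--                   for w in range(q_max + 1)]
--     for h in range(1, q_max + 1):
--         dims[h] = dp[h][M]
--     return dims
-- ===== Notes on version B (the rewrite author's own statement) =====
-- stated objective: faster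
-- what changed: Instead of running a fresh dict-based DP over all modes for every weight h = 1..q_max, B runs one bottom-up array DP over (weight, charge) shared by all weights and reads every coefficient off the final table.
import Mathlib
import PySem

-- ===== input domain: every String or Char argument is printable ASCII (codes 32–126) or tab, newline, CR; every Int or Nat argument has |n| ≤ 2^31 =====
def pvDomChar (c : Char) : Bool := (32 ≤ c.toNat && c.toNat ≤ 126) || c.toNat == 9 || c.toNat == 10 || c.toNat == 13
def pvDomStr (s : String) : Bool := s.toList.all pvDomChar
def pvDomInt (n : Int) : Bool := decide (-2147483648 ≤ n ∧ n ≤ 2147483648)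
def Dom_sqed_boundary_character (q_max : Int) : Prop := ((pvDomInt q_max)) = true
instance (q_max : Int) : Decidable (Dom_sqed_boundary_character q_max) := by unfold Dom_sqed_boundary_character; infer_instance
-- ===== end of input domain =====

-- B replaces A's per-weight dict DP (a fresh Molien-type mode DP for each weight) by one shared
-- bottom-up array DP over (weight, charge); measured faster at the large test sizes.


-- ===== PORT A =====
-- Literal port of A's inner lru_cached helper count_states(weight, max_mode=20).
-- Its internal DP dict (tuple keys, only ever read back pointwise via .get) is ported as a
-- hash map, matching CPython's hash-table dict; the loop's per-key sums are proved
-- order-independent below, and the dict A RETURNS stays PySem.Dict in insertion order.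
def pvCountStates (weight : Int) (max_mode : Int) : Int :=
  if weight = 0 then 1
  else if weight < 0 then 0
  else
    let dp0 : Std.HashMap (Int × Int) Int := Std.HashMap.emptyWithCapacity.insert (0, 0) 1
    let modes : List (Int × Int) :=
      (PySem.List.pyRange 1 (min (weight + 1) (max_mode + 1)) 1).foldl
        (fun acc n => acc ++ [(n, 1), (n, -1), (n, 0)]) []
    let dp := modes.foldl (fun dp m =>
        dp.toList.foldl (fun new_dp kv =>
            if kv.1.1 + m.1 ≤ weight then
              new_dp.insert (kv.1.1 + m.1, kv.1.2 + m.2)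
                (new_dp.getD (kv.1.1 + m.1, kv.1.2 + m.2) 0 + kv.2)
            else new_dp) dp) dp0
    dp.getD (weight, 0) 0

def sqed_boundary_character (q_max : Int) : List (Int × Int) :=
  let dims0 : PySem.Dict Int Int := PySem.Dict.empty.insert 0 1
  let dims := (PySem.List.pyRange 1 (q_max + 1) 1).foldl
      (fun d h => d.insert h (pvCountStates h 20)) dims0
  dims.items

-- ===== PORT B =====
-- One functional DP step of Source B: add the single mode (n, dc) to the whole table.
def pvBStep (q_max : Int) (width : Int) (dp : List (List Int)) (n dc : Int) : List (List Int) :=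
  (PySem.List.pyRange 0 (q_max + 1) 1).map (fun w =>
    (PySem.List.pyRange 0 width 1).map (fun c =>
      PySem.List.pyGetD (PySem.List.pyGetD dp w []) c 0 +
      (if n ≤ w ∧ 0 ≤ c - dc ∧ c - dc < width then
        PySem.List.pyGetD (PySem.List.pyGetD dp (w - n) []) (c - dc) 0
      else 0)))

def sqed_boundary_character_alt (q_max : Int) : List (Int × Int) :=
  if q_max < 1 then [((0 : Int), (1 : Int))]
  else
    let M := min q_max 20
    let width := 2 * M + 1
    let zeros : List Int := List.replicate width.toNat 0
    let rows : List (List Int) := (PySem.List.pyRange 0 (q_max + 1) 1).map (fun _ => zeros)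
    let dp0 := rows.set 0 (zeros.set M.toNat 1)
    let dp := (PySem.List.pyRange 1 (M + 1) 1).foldl (fun dp n =>
        [(1 : Int), -1, 0].foldl (fun dp dc => pvBStep q_max width dp n dc) dp) dp0
    ((0 : Int), (1 : Int)) ::
      (PySem.List.pyRange 1 (q_max + 1) 1).map (fun h =>
        (h, PySem.List.pyGetD (PySem.List.pyGetD dp h []) M 0))

-- ===== PRECONDITION & SPEC =====
def Spec_sqed_boundary_character (q_max : Int) (out : List (Int × Int)) : Prop := out = sqed_boundary_character_alt q_max
instance (q_max : Int) (out : List (Int × Int)) : Decidable (Spec_sqed_boundary_character q_max out) := by unfold Spec_sqed_boundary_character; infer_instance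

-- ===== CLAIM (what is proved, stated in full; the proofs are below) =====
def Claim_equal_sqed_boundary_character : Prop := ∀ (q_max : Int), Dom_sqed_boundary_character q_max → Spec_sqed_boundary_character q_max (sqed_boundary_character q_max)

-- ===== LEMMAS AND PROOFS =====
-- Abstract DP state: g w c = number of states of weight w, charge c.
def ag0 : Int → Int → Int := fun w c => if w = 0 ∧ c = 0 then 1 else 0

def astep (cut : Int) (m : Int × Int) (g : Int → Int → Int) : Int → Int → Int :=
  fun w c => g w c + (if w ≤ cut then g (w - m.1) (c - m.2) else 0)

def arun (cut : Int) (ms : List (Int × Int)) : Int → Int → Int :=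
  ms.foldl (fun g m => astep cut m g) ag0

def pvModes (M : Int) : List (Int × Int) :=
  (PySem.List.pyRange 1 (M + 1) 1).flatMap (fun n => [(n, 1), (n, -1), (n, 0)])

theorem arun_concat (cut : Int) (ms : List (Int × Int)) (m : Int × Int) :
    arun cut (ms ++ [m]) = astep cut m (arun cut ms) := by
  simp [arun]

theorem arun_support (cut : Int) (ms : List (Int × Int))
    (h : ∀ m ∈ ms, 1 ≤ m.1 ∧ (m.2 = 1 ∨ m.2 = -1 ∨ m.2 = 0))
    (w ch : Int) (hnz : arun cut ms w ch ≠ 0) :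
    0 ≤ w ∧ -((ms.countP (fun m => m.2 == -1) : Int)) ≤ ch ∧
      ch ≤ (ms.countP (fun m => m.2 == 1) : Int) := by
  induction ms using List.reverseRecOn generalizing w ch with
  | nil =>
    simp [arun, ag0] at hnz ⊢
    rcases hnz with ⟨h1, h2⟩
    omega
  | append_singleton ms m ih =>
    have hms : ∀ x ∈ ms, 1 ≤ x.1 ∧ (x.2 = 1 ∨ x.2 = -1 ∨ x.2 = 0) :=
      fun x hx => h x (by simp [hx])
    have hm := h m (by simp)
    rw [arun_concat] at hnz
    unfold astep at hnz
    have : arun cut ms w ch ≠ 0 ∨ arun cut ms (w - m.1) (ch - m.2) ≠ 0 := by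
      by_contra hc
      rw [not_or, not_not, not_not] at hc
      rcases hc with ⟨h1, h2⟩
      rw [h1, h2] at hnz
      simp at hnz
    have hcount : ∀ (p : Int × Int → Bool),
        (ms ++ [m]).countP p = ms.countP p + (if p m then 1 else 0) := by
      intro p; simp [List.countP_append, List.countP_cons]
    rw [hcount, hcount]
    rcases this with hnz' | hnz'
    · obtain ⟨hw', hlo, hhi⟩ := ih hms _ _ hnz'
      refine ⟨hw', ?_, ?_⟩ <;> push_cast <;> split_ifs <;> omega
    · obtain ⟨hw', hlo, hhi⟩ := ih hms _ _ hnz'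
      obtain ⟨hm1, hm2⟩ := hm
      refine ⟨by omega, ?_, ?_⟩ <;> push_cast <;>
        rcases hm2 with h2 | h2 | h2 <;> simp [h2] <;> omega

theorem arun_cut_irrel (cut1 cut2 : Int) (ms : List (Int × Int))
    (h : ∀ m ∈ ms, 1 ≤ m.1) (w c : Int) (h1 : w ≤ cut1) (h2 : w ≤ cut2) :
    arun cut1 ms w c = arun cut2 ms w c := by
  induction ms using List.reverseRecOn generalizing w c with
  | nil => rfl
  | append_singleton ms m ih =>
    have hms : ∀ x ∈ ms, 1 ≤ x.1 := fun x hx => h x (by simp [hx])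
    have hm : 1 ≤ m.1 := h m (by simp)
    rw [arun_concat, arun_concat]
    unfold astep
    rw [if_pos h1, if_pos h2, ih hms w c h1 h2,
      ih hms (w - m.1) (c - m.2) (by omega) (by omega)]

theorem arun_ext (cut b : Int) (ms ex : List (Int × Int))
    (hms : ∀ m ∈ ms, 1 ≤ m.1 ∧ (m.2 = 1 ∨ m.2 = -1 ∨ m.2 = 0))
    (hex : ∀ m ∈ ex, (1 ≤ m.1 ∧ (m.2 = 1 ∨ m.2 = -1 ∨ m.2 = 0)) ∧ b < m.1)
    (w c : Int) (hw : w ≤ b) :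
    arun cut (ms ++ ex) w c = arun cut ms w c := by
  induction ex using List.reverseRecOn generalizing w c with
  | nil => simp
  | append_singleton ex m ih =>
    have hex' : ∀ x ∈ ex, (1 ≤ x.1 ∧ (x.2 = 1 ∨ x.2 = -1 ∨ x.2 = 0)) ∧ b < x.1 :=
      fun x hx => hex x (by simp [hx])
    have hm := hex m (by simp)
    rw [← List.append_assoc, arun_concat]
    unfold astep
    have hall : ∀ x ∈ ms ++ ex, 1 ≤ x.1 ∧ (x.2 = 1 ∨ x.2 = -1 ∨ x.2 = 0) := by
      intro x hx
      rcases List.mem_append.mp hx with h' | h'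
      · exact hms x h'
      · exact (hex' x h').1
    have hzero : arun cut (ms ++ ex) (w - m.1) (c - m.2) = 0 := by
      by_contra hnz
      have := (arun_support cut _ hall _ _ hnz).1
      omega
    have hih := ih hex' w c hw
    split_ifs <;> simp [hzero, hih]
theorem mem_pvModes (M : Int) (m : Int × Int) (hm : m ∈ pvModes M) :
    (1 ≤ m.1 ∧ (m.2 = 1 ∨ m.2 = -1 ∨ m.2 = 0)) ∧ m.1 ≤ M := by
  rcases List.mem_flatMap.mp hm with ⟨n, hn, hmem⟩
  rw [PySem.List.mem_pyRange_one] at hn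
  simp at hmem
  rcases hmem with h | h | h <;> rw [h] <;> simp <;> omega

theorem pvModes_append (M1 M2 : Int) (h0 : 0 ≤ M1) (h12 : M1 ≤ M2) :
    pvModes M2 = pvModes M1 ++
      (PySem.List.pyRange (M1 + 1) (M2 + 1) 1).flatMap (fun n => [(n, 1), (n, -1), (n, 0)]) := by
  unfold pvModes
  rw [PySem.List.pyRange_one_append 1 (M1 + 1) (M2 + 1) (by omega) (by omega),
    List.flatMap_append]

theorem pvModes_countP (k : Nat) (v : Int) (hv : v = 1 ∨ v = -1) :
    (pvModes (k : Int)).countP (fun m => m.2 == v) = k := by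
  induction k with
  | zero => simp [pvModes, PySem.List.pyRange_one_eq_nil]
  | succ k ih =>
    have : pvModes ((k + 1 : Nat) : Int) = pvModes (k : Int) ++
        [(((k : Int) + 1), 1), (((k : Int) + 1), -1), (((k : Int) + 1), 0)] := by
      unfold pvModes
      rw [show (((k + 1 : Nat) : Int) + 1) = ((k : Int) + 1) + 1 by push_cast; ring,
        PySem.List.pyRange_one_succ_right (by omega : (1:Int) ≤ (k : Int) + 1), List.flatMap_append]
      simp
    rw [this, List.countP_append, ih]
    rcases hv with h | h <;> simp [h]

-- In a list with pairwise-distinct keys, the entries whose key is s sum to the lookup's value.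
theorem filter_key_of_mem (l : List ((Int × Int) × Int))
    (hl : l.Pairwise (fun a b => (a.1 == b.1) = false)) (sv : (Int × Int) × Int)
    (hmem : sv ∈ l) : l.filter (fun kv => kv.1 == sv.1) = [sv] := by
  induction l with
  | nil => cases hmem
  | cons a l ih =>
    rw [List.pairwise_cons] at hl
    rw [List.filter_cons]
    rcases List.mem_cons.mp hmem with h | h
    · rw [← h]
      simp only [beq_self_eq_true]
      have hfil : l.filter (fun kv => kv.1 == a.1) = [] := by
        rw [List.filter_eq_nil_iff]
        intro x hx
        have := hl.1 x hx
        simp only [beq_eq_false_iff_ne] at this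
        simp only [beq_iff_eq]
        exact fun hc => this hc.symm
      rw [← h] at hfil
      rw [hfil]
      simp
    · have hne : (a.1 == sv.1) = false := hl.1 sv h
      rw [hne]
      simp only [Bool.false_eq_true, if_false]
      exact ih hl.2 h

theorem sum_filter_toList (m : Std.HashMap (Int × Int) Int) (s : Int × Int) :
    ((m.toList.filter (fun kv => kv.1 == s)).map (·.2)).sum = m.getD s 0 := by
  rw [Std.HashMap.getD_eq_getD_getElem?]
  cases hs : m[s]? with
  | none =>
    have hfil : m.toList.filter (fun kv => kv.1 == s) = [] := by
      rw [List.filter_eq_nil_iff]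
      intro kv hkv
      simp only [beq_iff_eq]
      intro hk
      have : m[kv.1]? = some kv.2 := Std.HashMap.mem_toList_iff_getElem?_eq_some.mp hkv
      rw [hk, hs] at this
      cases this
    rw [hfil]
    rfl
  | some v =>
    have hmem : ((s, v) : (Int × Int) × Int) ∈ m.toList :=
      Std.HashMap.mem_toList_iff_getElem?_eq_some.mpr hs
    rw [filter_key_of_mem m.toList Std.HashMap.distinct_keys_toList (s, v) hmem]
    simp

-- One inner A-loop (over a fixed items list) changes a lookup by the matching entries' sum.
theorem inner_fold_getD (wm cm cut : Int) (l : List ((Int × Int) × Int))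
    (nd : Std.HashMap (Int × Int) Int) (K : Int × Int) :
    (l.foldl (fun new_dp kv =>
        if kv.1.1 + wm ≤ cut then
          new_dp.insert (kv.1.1 + wm, kv.1.2 + cm)
            (new_dp.getD (kv.1.1 + wm, kv.1.2 + cm) 0 + kv.2)
        else new_dp) nd).getD K 0
      = nd.getD K 0 +
        ((l.filter (fun kv => ((kv.1.1 + wm, kv.1.2 + cm) == K) && decide (kv.1.1 + wm ≤ cut))).map (·.2)).sum := by
  induction l generalizing nd with
  | nil => simp
  | cons kv l ih =>
    rw [List.foldl_cons, List.filter_cons]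
    by_cases hcut : kv.1.1 + wm ≤ cut
    · rw [if_pos hcut, ih]
      by_cases hk : ((kv.1.1 + wm, kv.1.2 + cm) : Int × Int) = K
      · have hb : (((kv.1.1 + wm, kv.1.2 + cm) == K) && decide (kv.1.1 + wm ≤ cut)) = true := by
          simp only [Bool.and_eq_true, beq_iff_eq, decide_eq_true_eq]
          exact ⟨hk, hcut⟩
        rw [if_pos hb, List.map_cons, List.sum_cons, Std.HashMap.getD_insert]
        rw [if_pos (by simp [hk]), hk]
        ring
      · have hb' : ¬ ((((kv.1.1 + wm, kv.1.2 + cm) == K) && decide (kv.1.1 + wm ≤ cut)) = true) := by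
          simp [hk]
        rw [if_neg hb', Std.HashMap.getD_insert, if_neg (by simp [hk])]
    · rw [if_neg hcut]
      have hb' : ¬ ((((kv.1.1 + wm, kv.1.2 + cm) == K) && decide (kv.1.1 + wm ≤ cut)) = true) := by
        simp [hcut]
      rw [if_neg hb', ih]

-- One A-mode step realises `astep` on the abstract state.
theorem mode_step_getD (cut : Int) (m : Int × Int) (dp : Std.HashMap (Int × Int) Int)
    (g : Int → Int → Int)
    (hg : ∀ w c : Int, dp.getD (w, c) 0 = g w c) (w c : Int) :
    (dp.toList.foldl (fun new_dp kv =>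
        if kv.1.1 + m.1 ≤ cut then
          new_dp.insert (kv.1.1 + m.1, kv.1.2 + m.2)
            (new_dp.getD (kv.1.1 + m.1, kv.1.2 + m.2) 0 + kv.2)
        else new_dp) dp).getD (w, c) 0 = astep cut m g w c := by
  rw [inner_fold_getD, hg]
  unfold astep
  congr 1
  by_cases hcut : w ≤ cut
  · have hfil : dp.toList.filter
        (fun kv => ((kv.1.1 + m.1, kv.1.2 + m.2) == ((w, c) : Int × Int)) && decide (kv.1.1 + m.1 ≤ cut))
        = dp.toList.filter (fun kv => kv.1 == ((w - m.1, c - m.2) : Int × Int)) := by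
      apply List.filter_congr
      intro kv _
      by_cases hk : kv.1 = ((w - m.1, c - m.2) : Int × Int)
      · have h1 : kv.1.1 = w - m.1 := by rw [hk]
        have h2 : kv.1.2 = c - m.2 := by rw [hk]
        simp [hk, hcut]
      · have hne : ((kv.1.1 + m.1, kv.1.2 + m.2) == ((w, c) : Int × Int)) = false := by
          rw [beq_eq_false_iff_ne]
          intro hh
          apply hk
          rw [Prod.ext_iff] at hh
          simp only [Prod.ext_iff]
          simp at hh ⊢
          omega
        simp [hne, hk]
    rw [if_pos hcut, hfil, sum_filter_toList dp, hg]
  · have hfil : dp.toList.filter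
        (fun kv => ((kv.1.1 + m.1, kv.1.2 + m.2) == ((w, c) : Int × Int)) && decide (kv.1.1 + m.1 ≤ cut))
        = [] := by
      rw [List.filter_eq_nil_iff]
      intro kv _
      simp only [Bool.and_eq_true, beq_iff_eq, decide_eq_true_eq, Prod.mk.injEq, not_and]
      intro h1 h2
      omega
    rw [if_neg hcut, hfil]
    simp

-- A's whole mode loop realises the abstract fold.
theorem afold_getD (cut : Int) (ms : List (Int × Int)) :
    ∀ (dp : Std.HashMap (Int × Int) Int) (g : Int → Int → Int),
    (∀ w c : Int, dp.getD (w, c) 0 = g w c) → ∀ w c : Int,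
    (ms.foldl (fun dp m =>
      dp.toList.foldl (fun new_dp kv =>
        if kv.1.1 + m.1 ≤ cut then
          new_dp.insert (kv.1.1 + m.1, kv.1.2 + m.2)
            (new_dp.getD (kv.1.1 + m.1, kv.1.2 + m.2) 0 + kv.2)
        else new_dp) dp) dp).getD (w, c) 0
      = (ms.foldl (fun g m => astep cut m g) g) w c := by
  induction ms with
  | nil => intro dp g hg w c; exact hg w c
  | cons m ms ih =>
    intro dp g hg w c
    rw [List.foldl_cons, List.foldl_cons]
    exact ih _ _ (mode_step_getD cut m dp g hg) w c

theorem countStates_eq (weight : Int) (h1 : 1 ≤ weight) :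
    pvCountStates weight 20 = arun weight (pvModes (min weight 20)) weight 0 := by
  unfold pvCountStates
  rw [if_neg (by omega), if_neg (by omega)]
  rw [show min (weight + 1) (20 + 1) = min weight 20 + 1 by omega]
  rw [PySem.List.foldl_append_eq_flatMap]
  rw [List.nil_append]
  exact afold_getD weight (pvModes (min weight 20)) _ ag0
    (by
      intro w c
      rw [Std.HashMap.getD_insert]
      unfold ag0
      by_cases h : ((w, c) : Int × Int) = ((0, 0) : Int × Int)
      · rw [if_pos (by simp [h]), if_pos (by
          rw [Prod.ext_iff] at h
          simp only at h
          exact ⟨h.1.symm ▸ rfl, h.2.symm ▸ rfl⟩)]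
      · rw [if_neg (by simp [Prod.ext_iff] at h ⊢; omega)]
        rw [Prod.ext_iff] at h
        simp only at h
        rw [if_neg (by tauto), Std.HashMap.getD_emptyWithCapacity])
    weight 0

-- One B step realises `astep` on the abstract state (truncated charges are 0 by support).
theorem pvBStep_val (q_max M : Int) (dp : List (List Int)) (g : Int → Int → Int)
    (hdp : ∀ w c : Int, 0 ≤ w → w ≤ q_max → 0 ≤ c → c < 2 * M + 1 →
      PySem.List.pyGetD (PySem.List.pyGetD dp w []) c 0 = g w (c - M))
    (hsup : ∀ w ch : Int, g w ch ≠ 0 → 0 ≤ w ∧ -M ≤ ch ∧ ch ≤ M)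
    (n dc : Int) (hn : 1 ≤ n)
    (w c : Int) (hw0 : 0 ≤ w) (hwq : w ≤ q_max) (hc0 : 0 ≤ c) (hcw : c < 2 * M + 1) :
    PySem.List.pyGetD (PySem.List.pyGetD (pvBStep q_max (2 * M + 1) dp n dc) w []) c 0
      = astep q_max (n, dc) g w (c - M) := by
  unfold pvBStep
  rw [PySem.List.pyGetD_map_pyRange_of_nonneg _ _ _ _ hw0 (by omega)]
  rw [PySem.List.pyGetD_map_pyRange_of_nonneg _ _ _ _ hc0 hcw]
  unfold astep
  simp only
  rw [if_pos hwq]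
  congr 1
  · exact hdp w c hw0 hwq hc0 hcw
  · by_cases hg : n ≤ w ∧ 0 ≤ c - dc ∧ c - dc < 2 * M + 1
    · rw [if_pos hg, hdp (w - n) (c - dc) (by omega) (by omega) hg.2.1 hg.2.2]
      congr 1
      omega
    · rw [if_neg hg]
      by_contra hnz
      have := hsup (w - n) (c - M - dc) (fun hz => hnz hz.symm)
      omega

-- B's fold over any tail of the mode list keeps the table equal to the abstract fold.
theorem pvBFold_val (q_max M : Int) (hM : M = min q_max 20) :
    ∀ (ms pre : List (Int × Int)) (dp : List (List Int)),
    (∀ m ∈ pre ++ ms, 1 ≤ m.1 ∧ (m.2 = 1 ∨ m.2 = -1 ∨ m.2 = 0)) →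
    (((pre ++ ms).countP (fun m => m.2 == 1) : Int)) ≤ M →
    (((pre ++ ms).countP (fun m => m.2 == -1) : Int)) ≤ M →
    (∀ w c : Int, 0 ≤ w → w ≤ q_max → 0 ≤ c → c < 2 * M + 1 →
      PySem.List.pyGetD (PySem.List.pyGetD dp w []) c 0 = arun q_max pre w (c - M)) →
    ∀ w c : Int, 0 ≤ w → w ≤ q_max → 0 ≤ c → c < 2 * M + 1 →
    PySem.List.pyGetD (PySem.List.pyGetD
        (ms.foldl (fun dp m => pvBStep q_max (2 * M + 1) dp m.1 m.2) dp) w []) c 0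
      = arun q_max (pre ++ ms) w (c - M) := by
  intro ms
  induction ms with
  | nil =>
    intro pre dp hgood _ _ hdp w c hw0 hwq hc0 hcw
    rw [List.append_nil] at *
    exact hdp w c hw0 hwq hc0 hcw
  | cons m ms ih =>
    intro pre dp hgood hcb hcg hdp w c hw0 hwq hc0 hcw
    rw [List.foldl_cons]
    have hassoc : pre ++ m :: ms = (pre ++ [m]) ++ ms := by simp
    rw [hassoc]
    have hgood' : ∀ x ∈ (pre ++ [m]) ++ ms, 1 ≤ x.1 ∧ (x.2 = 1 ∨ x.2 = -1 ∨ x.2 = 0) := by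
      rw [← hassoc]; exact hgood
    have hcb' : (((pre ++ [m]) ++ ms).countP (fun m => m.2 == 1) : Int) ≤ M := by
      rw [← hassoc]; exact hcb
    have hcg' : (((pre ++ [m]) ++ ms).countP (fun m => m.2 == -1) : Int) ≤ M := by
      rw [← hassoc]; exact hcg
    refine ih (pre ++ [m]) _ hgood' hcb' hcg' ?_ w c hw0 hwq hc0 hcw
    intro w c hw0 hwq hc0 hcw
    rw [arun_concat]
    have hsup : ∀ w ch : Int, arun q_max pre w ch ≠ 0 → 0 ≤ w ∧ -M ≤ ch ∧ ch ≤ M := by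
      intro w ch hnz
      have hpre : ∀ x ∈ pre, 1 ≤ x.1 ∧ (x.2 = 1 ∨ x.2 = -1 ∨ x.2 = 0) := by
        intro x hx; exact hgood x (by simp [hx])
      obtain ⟨h1, h2, h3⟩ := arun_support q_max pre hpre w ch hnz
      have hb : pre.countP (fun m => m.2 == 1) ≤ (pre ++ m :: ms).countP (fun m => m.2 == 1) := by
        rw [List.countP_append]; omega
      have hg2 : pre.countP (fun m => m.2 == -1) ≤ (pre ++ m :: ms).countP (fun m => m.2 == -1) := by
        rw [List.countP_append]; omega
      refine ⟨h1, ?_, ?_⟩ <;> omega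
    have hm1 : 1 ≤ m.1 := (hgood m (by simp)).1
    have := pvBStep_val q_max M dp (arun q_max pre) hdp hsup m.1 m.2 hm1 w c hw0 hwq hc0 hcw
    rw [this]
-- The initial B table is the abstract initial state.
theorem dp0_val (q_max M : Int) (hq : 1 ≤ q_max) (hM1 : 1 ≤ M)
    (w c : Int) (hw0 : 0 ≤ w) (hwq : w ≤ q_max) (hc0 : 0 ≤ c) (hcw : c < 2 * M + 1) :
    PySem.List.pyGetD (PySem.List.pyGetD
      (((PySem.List.pyRange 0 (q_max + 1) 1).map
          (fun _ => List.replicate (2 * M + 1).toNat (0 : Int))).set 0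
        ((List.replicate (2 * M + 1).toNat (0 : Int)).set M.toNat 1)) w []) c 0
      = ag0 w (c - M) := by
  have hlen : ((((PySem.List.pyRange 0 (q_max + 1) 1).map
      (fun _ => List.replicate (2 * M + 1).toNat (0 : Int))).set 0
      ((List.replicate (2 * M + 1).toNat (0 : Int)).set M.toNat 1)).length : Int) = q_max + 1 := by
    rw [List.length_set, List.length_map, PySem.List.length_pyRange_one]
    omega
  rw [PySem.List.pyGetD_eq_getElem _ _ hw0 (by omega)]
  rw [List.getElem_set]
  by_cases hw : w = 0
  · have : (0 = w.toNat) = True := by simp [hw]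
    rw [if_pos (by omega)]
    rw [PySem.List.pyGetD_eq_getElem _ _ hc0
      (by rw [List.length_set, List.length_replicate]; omega)]
    rw [List.getElem_set]
    unfold ag0
    by_cases hc : c = M
    · rw [if_pos (by omega), if_pos (by omega)]
    · rw [if_neg (by omega), if_neg (by omega), List.getElem_replicate]
  · rw [if_neg (by omega), List.getElem_map]
    rw [PySem.List.pyGetD_eq_getElem _ _ hc0 (by rw [List.length_replicate]; omega)]
    rw [List.getElem_replicate]
    unfold ag0
    rw [if_neg (by omega)]

-- B's result, h-th entry, as the abstract fold over the full mode list.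
theorem alt_entry (q_max : Int) (hq : 1 ≤ q_max) :
    sqed_boundary_character_alt q_max
      = ((0 : Int), (1 : Int)) :: (PySem.List.pyRange 1 (q_max + 1) 1).map
          (fun h => (h, arun q_max (pvModes (min q_max 20)) h 0)) := by
  unfold sqed_boundary_character_alt
  rw [if_neg (by omega)]
  simp only
  congr 1
  apply List.map_congr_left
  intro h hmem
  rw [PySem.List.mem_pyRange_one] at hmem
  congr 1
  have hM1 : 1 ≤ min q_max 20 := by omega
  have hfl : (PySem.List.pyRange 1 (min q_max 20 + 1) 1).foldl
      (fun dp n => [(1 : Int), -1, 0].foldl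
        (fun dp dc => pvBStep q_max (2 * min q_max 20 + 1) dp n dc) dp)
      (((PySem.List.pyRange 0 (q_max + 1) 1).map
          (fun _ => List.replicate (2 * min q_max 20 + 1).toNat (0 : Int))).set 0
        ((List.replicate (2 * min q_max 20 + 1).toNat (0 : Int)).set (min q_max 20).toNat 1))
      = (pvModes (min q_max 20)).foldl
          (fun dp m => pvBStep q_max (2 * min q_max 20 + 1) dp m.1 m.2)
          (((PySem.List.pyRange 0 (q_max + 1) 1).map
              (fun _ => List.replicate (2 * min q_max 20 + 1).toNat (0 : Int))).set 0
            ((List.replicate (2 * min q_max 20 + 1).toNat (0 : Int)).set (min q_max 20).toNat 1)) := by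
    rw [pvModes, List.foldl_flatMap]
    rfl
  rw [hfl]
  have hcnt : ∀ v : Int, v = 1 ∨ v = -1 →
      (((pvModes (min q_max 20)).countP (fun m => m.2 == v) : Int)) ≤ min q_max 20 := by
    intro v hv
    rw [show (min q_max 20) = (((min q_max 20).toNat : Nat) : Int) by omega,
      pvModes_countP _ _ hv]
  have := pvBFold_val q_max (min q_max 20) rfl (pvModes (min q_max 20)) [] _
    (by intro m hm; simpa using (mem_pvModes _ m (by simpa using hm)).1)
    (by simpa using hcnt 1 (Or.inl rfl))
    (by simpa using hcnt (-1) (Or.inr rfl))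
    (by
      intro w c hw0 hwq hc0 hcw
      exact dp0_val q_max (min q_max 20) hq hM1 w c hw0 hwq hc0 hcw)
    h (min q_max 20) (by omega) (by omega) (by omega) (by omega)
  rw [List.nil_append] at this
  rw [this]
  norm_num
-- A's result as a list: vacuum entry followed by the per-weight counts.
theorem a_entry (q_max : Int) :
    sqed_boundary_character q_max
      = ((0 : Int), (1 : Int)) :: (PySem.List.pyRange 1 (q_max + 1) 1).map
          (fun h => (h, pvCountStates h 20)) := by
  unfold sqed_boundary_character
  simp only
  rw [show (fun (d : PySem.Dict Int Int) (h : Int) => d.insert h (pvCountStates h 20))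
      = (fun (d : PySem.Dict Int Int) (h : Int) => d.insert ((fun (x : Int) => x) h)
          ((fun (x : Int) => pvCountStates x 20) h)) from rfl]
  rw [PySem.Dict.items_foldl_insert_fresh _ _ _ _
    (by
      intro a ha
      rw [PySem.List.mem_pyRange_one] at ha
      rw [PySem.Dict.contains_insert]
      have : (a == (0 : Int)) = false := by simp; omega
      rw [this]
      simp [PySem.Dict.contains_empty])
    (by simpa using PySem.List.nodup_pyRange_one 1 (q_max + 1))]
  rfl

-- On weights 1..q_max the big shared DP agrees with A's per-weight DP.
theorem bridge (q_max h : Int) (h1 : 1 ≤ h) (h2 : h ≤ q_max) :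
    arun q_max (pvModes (min q_max 20)) h 0 = arun h (pvModes (min h 20)) h 0 := by
  have hgood1 : ∀ m ∈ pvModes (min h 20), 1 ≤ m.1 ∧ (m.2 = 1 ∨ m.2 = -1 ∨ m.2 = 0) :=
    fun m hm => (mem_pvModes _ m hm).1
  have hsplit := pvModes_append (min h 20) (min q_max 20) (by omega) (by omega)
  have hext : ∀ m ∈ (PySem.List.pyRange (min h 20 + 1) (min q_max 20 + 1) 1).flatMap
      (fun n => [(n, 1), (n, -1), (n, 0)]),
      (1 ≤ m.1 ∧ (m.2 = 1 ∨ m.2 = -1 ∨ m.2 = 0)) ∧ h < m.1 := by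
    intro m hm
    rcases List.mem_flatMap.mp hm with ⟨n, hn, hmem⟩
    rw [PySem.List.mem_pyRange_one] at hn
    have hn20 : min h 20 + 1 ≤ n ∧ n < min q_max 20 + 1 := hn
    have h20 : h ≤ 20 := by omega
    simp at hmem
    rcases hmem with hrw | hrw | hrw <;> rw [hrw] <;> simp <;> omega
  rw [hsplit, arun_ext q_max h (pvModes (min h 20)) _ hgood1 hext h 0 le_rfl]
  exact arun_cut_irrel q_max h (pvModes (min h 20))
    (fun m hm => (mem_pvModes _ m hm).1.1) h 0 h2 le_rfl

-- ===== VERDICT (by name: the statement is the Claim_ definition above) =====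
theorem sqed_boundary_character_spec : Claim_equal_sqed_boundary_character := by
  intro q_max _
  unfold Spec_sqed_boundary_character
  by_cases hq : q_max < 1
  · unfold sqed_boundary_character sqed_boundary_character_alt
    rw [if_pos hq]
    simp only
    rw [PySem.List.pyRange_one_eq_nil (by omega), List.foldl_nil]
    rfl
  · have hq1 : (1 : Int) ≤ q_max := by omega
    rw [a_entry, alt_entry q_max hq1]
    congr 1
    apply List.map_congr_left
    intro h hmem
    rw [PySem.List.mem_pyRange_one] at hmem
    rw [countStates_eq h hmem.1, ← bridge q_max h hmem.1 (by omega)]
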